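-- pv_equiv track=rewrite | github.com/513602588-dotcom/football | src/daily_jczq_pipeline.py | parse_model_candidates
-- ===== SOURCE A (Python) =====
-- from typing import Dict, List, Optional, Set, Tuple
--
-- def parse_model_candidates(model_value: str) -> List[str]:
--     raw_items = [x.strip() for x in str(model_value or "").split(",") if x.strip()]
--     if not raw_items:
--         raw_items = ["doubao-1.5-pro-32k"]
--     aliases = {
--         "豆包pro": "doubao-1.5-pro-32k", "豆包flash": "doubao-1.5-flash-32k",
--         "doubao-pro": "doubao-1.5-pro-32k", "doubao-flash": "doubao-1.5-flash-32k",
--     }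
--     out: List[str] = []
--     seen: Set[str] = set()
--     def push(name: str) -> None:
--         n = name.strip()
--         if not n or n.lower() in seen:
--             return
--         seen.add(n.lower())
--         out.append(n)
--     for item in raw_items:
--         normalized = aliases.get(item.lower(), item)
--         push(normalized)
--         low = normalized.lower()
--         if "pro" in low:
--             push("doubao-1.5-pro-32k")
--             push("doubao-1.5-flash-32k")
--         if "flash" in low:
--             push("doubao-1.5-flash-32k")
--             push("doubao-1.5-pro-32k")
--     return out
-- ===== SOURCE B (Python) =====
-- PRO = "doubao-1.5-pro-32k"
-- FLASH = "doubao-1.5-flash-32k"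
--
-- def _normalize(item):
--     low = item.lower()
--     if low == "\u8c46\u5305pro" or low == "doubao-pro":
--         return PRO
--     if low == "\u8c46\u5305flash" or low == "doubao-flash":
--         return FLASH
--     return item
--
-- def _emit(rest, acc):
--     # recursive over the remaining items; acc holds the output REVERSED,
--     # duplicates detected by scanning acc itself (no auxiliary set)
--     if not rest:
--         return acc
--     name = _normalize(rest[0])
--     low = name.lower()
--     cs = [name]
--     if "pro" in low:
--         cs += [PRO, FLASH]
--     if "flash" in low:
--         cs += [FLASH, PRO]
--     for c in cs:
--         n = c.strip()
--         if n and all(o.lower() != n.lower() for o in acc):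
--             acc = [n] + acc
--     return _emit(rest[1:], acc)
--
-- def parse_model_candidates(model_value):
--     items = [x.strip() for x in str(model_value or "").split(",") if x.strip()]
--     if not items:
--         items = [PRO]
--     return _emit(items, [])[::-1]
-- ===== Notes on version B (the rewrite author's own statement) =====
-- stated objective: alternative
-- what changed: B drops A's auxiliary membership set and alias dict: it recurses over the items, prepending each new name to a reversed accumulator and detecting duplicates by a linear case-insensitive scan of the accumulator itself, with aliases resolved by plain conditionals; the result is reversed at the end.
import Mathlib
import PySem

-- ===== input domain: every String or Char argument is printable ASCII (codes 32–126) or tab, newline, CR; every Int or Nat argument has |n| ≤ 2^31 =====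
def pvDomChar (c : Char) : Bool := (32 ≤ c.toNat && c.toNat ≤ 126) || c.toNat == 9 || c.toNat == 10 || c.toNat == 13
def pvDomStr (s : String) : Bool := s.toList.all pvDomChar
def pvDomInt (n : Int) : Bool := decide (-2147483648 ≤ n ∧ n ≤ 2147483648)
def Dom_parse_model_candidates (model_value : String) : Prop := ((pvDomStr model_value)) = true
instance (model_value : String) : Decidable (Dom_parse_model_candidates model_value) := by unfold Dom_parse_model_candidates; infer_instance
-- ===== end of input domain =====

-- B replaces A's alias dict and auxiliary membership set by a recursion over the items that
-- prepends new names to a reversed accumulator, detecting duplicates by a case-insensitive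
-- linear scan of the accumulator itself, and reverses once at the end (objective: alternative).

-- ===== PORT A =====
def pvAliasesA : PySem.Dict String String :=
  ((((PySem.Dict.empty).insert "豆包pro" "doubao-1.5-pro-32k").insert "豆包flash" "doubao-1.5-flash-32k").insert
      "doubao-pro" "doubao-1.5-pro-32k").insert "doubao-flash" "doubao-1.5-flash-32k"

-- the nested 'push' helper: state (out, seen)
def pvPushA (st : List String × PySem.Set String) (name : String) : List String × PySem.Set String :=
  let n := PySem.Str.strip name
  if n = "" ∨ PySem.Set.contains st.2 (PySem.Str.lower n) then st
  else (st.1 ++ [n], PySem.Set.add st.2 (PySem.Str.lower n))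

-- the body of the 'for item in raw_items' loop
def pvStepA (st : List String × PySem.Set String) (item : String) : List String × PySem.Set String :=
  let normalized := pvAliasesA.getD (PySem.Str.lower item) item
  let st := pvPushA st normalized
  let low := PySem.Str.lower normalized
  let st := if PySem.Str.isIn "pro" low then pvPushA (pvPushA st "doubao-1.5-pro-32k") "doubao-1.5-flash-32k" else st
  if PySem.Str.isIn "flash" low then pvPushA (pvPushA st "doubao-1.5-flash-32k") "doubao-1.5-pro-32k" else st

def parse_model_candidates (model_value : String) : List String :=
  let raw_items := (((PySem.Str.split? model_value ",").getD []).filter (fun x => PySem.Str.strip x ≠ "")).map PySem.Str.strip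
  let raw_items := if raw_items = [] then ["doubao-1.5-pro-32k"] else raw_items
  (raw_items.foldl pvStepA ([], PySem.Set.empty)).1

-- ===== PORT B =====
def pvPRO : String := "doubao-1.5-pro-32k"
def pvFLASH : String := "doubao-1.5-flash-32k"

-- _normalize: alias resolution by plain conditionals
def pvNormalizeB (item : String) : String :=
  let low := PySem.Str.lower item
  if low = "豆包pro" ∨ low = "doubao-pro" then pvPRO
  else if low = "豆包flash" ∨ low = "doubao-flash" then pvFLASH
  else item

-- body of the 'for c in cs' loop inside _emit: prepend n if no entry of acc matches case-insensitively
def pvStepCandB (acc : List String) (c : String) : List String :=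
  let n := PySem.Str.strip c
  if n ≠ "" ∧ acc.all (fun o => PySem.Str.lower o != PySem.Str.lower n) = true then n :: acc else acc

-- _emit: recursion over the remaining items, acc holds the output reversed
def pvEmitB : List String → List String → List String
  | [], acc => acc
  | item :: rest, acc =>
    let name := pvNormalizeB item
    let low := PySem.Str.lower name
    let cs := [name]
      ++ (if PySem.Str.isIn "pro" low then [pvPRO, pvFLASH] else [])
      ++ (if PySem.Str.isIn "flash" low then [pvFLASH, pvPRO] else [])
    pvEmitB rest (cs.foldl pvStepCandB acc)

def parse_model_candidates_alt (model_value : String) : List String :=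
  let items := (((PySem.Str.split? model_value ",").getD []).filter (fun x => PySem.Str.strip x ≠ "")).map PySem.Str.strip
  let items := if items = [] then [pvPRO] else items
  (pvEmitB items []).reverse

-- ===== PRECONDITION & SPEC =====
def Spec_parse_model_candidates (model_value : String) (out : List String) : Prop := out = parse_model_candidates_alt model_value
instance (model_value : String) (out : List String) : Decidable (Spec_parse_model_candidates model_value out) := by unfold Spec_parse_model_candidates; infer_instance

-- ===== CLAIM (what is proved, stated in full; the proofs are below) =====
def Claim_equal_parse_model_candidates : Prop := ∀ (model_value : String), Dom_parse_model_candidates model_value → Spec_parse_model_candidates model_value (parse_model_candidates model_value)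

-- ===== LEMMAS AND PROOFS =====

-- A's dict lookup computes B's conditional normalization
theorem pvNorm_corr (item : String) :
    pvAliasesA.getD (PySem.Str.lower item) item = pvNormalizeB item := by
  unfold pvAliasesA pvNormalizeB
  by_cases h1 : PySem.Str.lower item = "豆包pro" <;>
  by_cases h2 : PySem.Str.lower item = "豆包flash" <;>
  by_cases h3 : PySem.Str.lower item = "doubao-pro" <;>
  by_cases h4 : PySem.Str.lower item = "doubao-flash" <;>
    simp_all [PySem.Dict.getD_insert, pvPRO, pvFLASH]

-- A's candidate list for one item (a proof-side name for the stream pvStepA pushes)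
def pvCands (item : String) : List String :=
  let name := pvNormalizeB item
  let low := PySem.Str.lower name
  [name]
    ++ (if PySem.Str.isIn "pro" low then [pvPRO, pvFLASH] else [])
    ++ (if PySem.Str.isIn "flash" low then [pvFLASH, pvPRO] else [])

theorem pvStepA_eq_foldl (st : List String × PySem.Set String) (item : String) :
    pvStepA st item = (pvCands item).foldl pvPushA st := by
  simp only [pvStepA, pvCands, pvNorm_corr, pvPRO, pvFLASH]
  split_ifs <;> simp [List.foldl]

-- one candidate: A's push on the mirrored state is B's prepend-with-scan, mirrored
theorem pvPush_corr (acc : List String) (c : String) :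
    pvPushA (acc.reverse, acc.reverse.map PySem.Str.lower) c
      = ((pvStepCandB acc c).reverse, (pvStepCandB acc c).reverse.map PySem.Str.lower) := by
  unfold pvPushA pvStepCandB
  by_cases h0 : PySem.Str.strip c = ""
  · simp [h0]
  · by_cases hall : acc.all (fun o => PySem.Str.lower o != PySem.Str.lower (PySem.Str.strip c)) = true
    · have hnot : ¬ ∃ a ∈ acc, PySem.Str.lower a = PySem.Str.lower (PySem.Str.strip c) := by
        simp only [List.all_eq_true, bne_iff_ne, ne_eq] at hall
        rintro ⟨a, ha, heq⟩; exact hall a ha heq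
      simp [h0, hall, hnot, PySem.Set.add]
    · have hex : ∃ a ∈ acc, PySem.Str.lower a = PySem.Str.lower (PySem.Str.strip c) := by
        simp only [List.all_eq_true, bne_iff_ne, ne_eq, not_forall] at hall
        obtain ⟨o, ho, heq⟩ := hall
        exact ⟨o, ho, by simpa using heq⟩
      simp [h0, hall, hex]

theorem pvFoldlPush_corr (cs acc : List String) :
    cs.foldl pvPushA (acc.reverse, acc.reverse.map PySem.Str.lower)
      = ((cs.foldl pvStepCandB acc).reverse, (cs.foldl pvStepCandB acc).reverse.map PySem.Str.lower) := by
  induction cs generalizing acc with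
  | nil => rfl
  | cons c cs ih => simp only [List.foldl_cons, pvPush_corr, ih]

theorem pvEmit_corr (items acc : List String) :
    items.foldl pvStepA (acc.reverse, acc.reverse.map PySem.Str.lower)
      = ((pvEmitB items acc).reverse, (pvEmitB items acc).reverse.map PySem.Str.lower) := by
  induction items generalizing acc with
  | nil => rfl
  | cons item rest ih =>
    simp only [List.foldl_cons, pvStepA_eq_foldl, pvEmitB]
    rw [pvFoldlPush_corr, ih]
    rfl

-- ===== VERDICT (by name: the statement is the Claim_ definition above) =====
theorem parse_model_candidates_spec : Claim_equal_parse_model_candidates := by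
  intro model_value _
  unfold Spec_parse_model_candidates parse_model_candidates parse_model_candidates_alt
  simp only [pvPRO]
  have := pvEmit_corr (if ((((PySem.Str.split? model_value ",").getD []).filter (fun x => PySem.Str.strip x ≠ "")).map PySem.Str.strip) = [] then ["doubao-1.5-pro-32k"] else (((PySem.Str.split? model_value ",").getD []).filter (fun x => PySem.Str.strip x ≠ "")).map PySem.Str.strip) []
  simp only [List.reverse_nil, List.map_nil] at this
  simp only [PySem.Set.empty, this]
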